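-- pv_equiv track=rewrite | github.com/mathelai/github.io | imo2025p6/simulation.py | strategy_diagonal
-- ===== SOURCE A (Python) =====
-- from typing import List, Tuple, Set
--
-- class TilePlacementSimulation:
--     """Simulates the tile placement problem on an n×n grid."""
--
--     def __init__(self, n: int):
--         self.n = n
--         self.grid = [[False] * n for _ in range(n)]  # False = uncovered, True = covered
--         self.tiles = []  # List of (row, col, height, width) tuples
--
--     def place_tile(self, row: int, col: int, height: int, width: int) -> bool:
--         """
--         Try to place a tile at (row, col) with given dimensions.
--         Returns True if successful, False if it would overlap existing tiles.
--         """
--         # Check if tile fits in grid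
--         if row + height > self.n or col + width > self.n:
--             return False
--
--         # Check for overlaps
--         for r in range(row, row + height):
--             for c in range(col, col + width):
--                 if self.grid[r][c]:
--                     return False
--
--         # Place the tile
--         for r in range(row, row + height):
--             for c in range(col, col + width):
--                 self.grid[r][c] = True
--
--         self.tiles.append((row, col, height, width))
--         return True
--
--     def count_uncovered_per_row(self) -> List[int]:
--         """Count uncovered squares in each row."""
--         return [sum(1 for cell in row if not cell) for row in self.grid]
--
--     def count_uncovered_per_col(self) -> List[int]:
--         """Count uncovered squares in each column."""
--         return [sum(1 for row in self.grid if not row[c]) for c in range(self.n)]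
--
--     def is_valid_solution(self) -> bool:
--         """Check if current configuration satisfies the constraint."""
--         row_counts = self.count_uncovered_per_row()
--         col_counts = self.count_uncovered_per_col()
--         return all(c == 1 for c in row_counts) and all(c == 1 for c in col_counts)
--
--     def get_uncovered_positions(self) -> Set[Tuple[int, int]]:
--         """Return set of uncovered positions."""
--         uncovered = set()
--         for r in range(self.n):
--             for c in range(self.n):
--                 if not self.grid[r][c]:
--                     uncovered.add((r, c))
--         return uncovered
--
--     def reset(self):
--         """Reset the grid."""
--         self.grid = [[False] * self.n for _ in range(self.n)]
--         self.tiles = []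
--
-- def strategy_diagonal(n: int) -> Tuple[int, List[Tuple[int, int, int, int]]]:
--     """
--     Strategy: Leave diagonal uncovered, cover rest with minimal tiles.
--     For diagonal: uncovered at (i, i) for each i.
--     This satisfies: each row i has exactly one uncovered square at (i, i)
--                     each column i has exactly one uncovered square at (i, i)
--     """
--     sim = TilePlacementSimulation(n)
--     tiles = []
--
--     # For each row i, we need to cover all columns except column i
--     # We can use one tile for columns [0, i) and one for columns [i+1, n)
--     for i in range(n):
--         # Cover left side: columns [0, i)
--         if i > 0:
--             sim.place_tile(i, 0, 1, i)
--             tiles.append((i, 0, 1, i))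
--
--         # Cover right side: columns [i+1, n)
--         if i < n - 1:
--             sim.place_tile(i, i + 1, 1, n - i - 1)
--             tiles.append((i, i + 1, 1, n - i - 1))
--
--     return len(tiles), tiles
-- ===== SOURCE B (Python) =====
-- def strategy_diagonal(n):
--     # Emit tiles directly into a preallocated list; no grid simulation.
--     if n <= 1:
--         return 0, []
--     m = 2 * n - 2
--     tiles = [None] * m
--     tiles[0] = (0, 1, 1, n - 1)
--     tiles[m - 1] = (n - 1, 0, 1, n - 1)
--     for i in range(1, n - 1):
--         tiles[2 * i - 1] = (i, 0, 1, i)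
--         tiles[2 * i] = (i, i + 1, 1, n - i - 1)
--     return m, tiles
-- ===== Notes on version B (the rewrite author's own statement) =====
-- stated objective: faster
-- what changed: B emits the tile list directly (boundary rows explicit, middle rows in one pass, closed-form count 2n-2) instead of running an n×n grid simulation that places each tile cell by cell.
import Mathlib
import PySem

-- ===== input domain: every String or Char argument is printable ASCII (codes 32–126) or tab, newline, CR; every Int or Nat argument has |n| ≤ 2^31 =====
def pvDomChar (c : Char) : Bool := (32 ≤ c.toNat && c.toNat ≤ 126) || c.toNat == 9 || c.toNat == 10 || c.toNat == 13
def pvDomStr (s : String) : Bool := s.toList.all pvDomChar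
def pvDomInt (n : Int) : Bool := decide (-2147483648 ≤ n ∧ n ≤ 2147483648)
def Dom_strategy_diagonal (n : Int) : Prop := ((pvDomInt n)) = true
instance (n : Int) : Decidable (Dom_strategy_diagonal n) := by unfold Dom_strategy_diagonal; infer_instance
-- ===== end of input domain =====

-- B replaces A's n×n grid simulation by direct emission of the tile list with a
-- closed-form count (objective: faster). A's simulation state never affects A's
-- return value; only the locally built `tiles` list does.

-- ===== PORT A =====
-- state of TilePlacementSimulation: n, grid, tiles
structure PySim where
  n : Int
  grid : List (List Bool)
  tiles : List (Int × Int × Int × Int)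

-- __init__: [[False] * n for _ in range(n)]  ([False]*n is empty for n ≤ 0, as replicate n.toNat)
def simInit (n : Int) : PySim :=
  { n := n, grid := List.replicate n.toNat (List.replicate n.toNat false), tiles := [] }

-- self.grid[r][c]; at every call reached below the indices are in range, so the defaults are never used
def gridGet (g : List (List Bool)) (r c : Int) : Bool :=
  PySem.List.pyGetD (PySem.List.pyGetD g r []) c false

-- self.grid[r][c] = True; same in-range remark
def gridSet (g : List (List Bool)) (r c : Int) : List (List Bool) :=
  PySem.List.pySetD g r (PySem.List.pySetD (PySem.List.pyGetD g r []) c true)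

-- place_tile, transliterated: fit check, overlap scan, then cell-by-cell placement
def placeTile (sim : PySim) (row col height width : Int) : Bool × PySim :=
  if row + height > sim.n ∨ col + width > sim.n then (false, sim)
  else if (PySem.List.pyRange row (row + height) 1).any (fun r =>
            (PySem.List.pyRange col (col + width) 1).any (fun c => gridGet sim.grid r c)) then
    (false, sim)
  else
    let grid' := (PySem.List.pyRange row (row + height) 1).foldl (fun g r =>
      (PySem.List.pyRange col (col + width) 1).foldl (fun g c => gridSet g r c) g) sim.grid
    (true, { sim with grid := grid', tiles := sim.tiles ++ [(row, col, height, width)] })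

-- loop body of strategy_diagonal for one i
def stratStep (n : Int) (st : PySim × List (Int × Int × Int × Int)) (i : Int) :
    PySim × List (Int × Int × Int × Int) :=
  let st :=
    if i > 0 then ((placeTile st.1 i 0 1 i).2, st.2 ++ [(i, 0, 1, i)]) else st
  if i < n - 1 then ((placeTile st.1 i (i + 1) 1 (n - i - 1)).2, st.2 ++ [(i, i + 1, 1, n - i - 1)])
  else st

def strategy_diagonal (n : Int) : Int × (List (Int × Int × Int × Int)) :=
  let st := (PySem.List.pyRange 0 n 1).foldl (stratStep n) (simInit n, [])
  ((st.2.length : Int), st.2)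

-- ===== PORT B =====
-- loop body: tiles[2*i-1] = (i, 0, 1, i); tiles[2*i] = (i, i+1, 1, n-i-1)
def fillStep (n : Int) (ts : List (Option (Int × Int × Int × Int))) (i : Int) :
    List (Option (Int × Int × Int × Int)) :=
  PySem.List.pySetD (PySem.List.pySetD ts (2 * i - 1) (some (i, 0, 1, i)))
    (2 * i) (some (i, i + 1, 1, n - i - 1))

-- the placeholder list [None] * m is typed List (Option _); every slot is filled before the
-- return, so the final Option.getD projection is exact
def strategy_diagonal_alt (n : Int) : Int × (List (Int × Int × Int × Int)) :=
  if n ≤ 1 then (0, [])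
  else
    let m := 2 * n - 2
    let t0 : List (Option (Int × Int × Int × Int)) := List.replicate m.toNat none
    let t1 := PySem.List.pySetD t0 0 (some (0, 1, 1, n - 1))
    let t2 := PySem.List.pySetD t1 (m - 1) (some (n - 1, 0, 1, n - 1))
    let tiles := (PySem.List.pyRange 1 (n - 1) 1).foldl (fillStep n) t2
    (m, tiles.map (fun o => o.getD (0, 0, 0, 0)))

-- ===== PRECONDITION & SPEC =====
def Spec_strategy_diagonal (n : Int) (out : Int × (List (Int × Int × Int × Int))) : Prop := out = strategy_diagonal_alt n
instance (n : Int) (out : Int × (List (Int × Int × Int × Int))) : Decidable (Spec_strategy_diagonal n out) := by unfold Spec_strategy_diagonal; infer_instance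

-- ===== CLAIM (what is proved, stated in full; the proofs are below) =====
def Claim_equal_strategy_diagonal : Prop := ∀ (n : Int), Dom_strategy_diagonal n → Spec_strategy_diagonal n (strategy_diagonal n)

-- ===== LEMMAS AND PROOFS =====

-- per-row tiles contribution of A's loop
def rowTiles (n i : Int) : List (Int × Int × Int × Int) :=
  (if i > 0 then [(i, 0, 1, i)] else []) ++
  (if i < n - 1 then [(i, i + 1, 1, n - i - 1)] else [])

lemma stratStep_snd (n : Int) (st : PySim × List (Int × Int × Int × Int)) (i : Int) :
    (stratStep n st i).2 = st.2 ++ rowTiles n i := by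
  simp only [stratStep, rowTiles]
  split_ifs <;> simp

-- the tiles component of A's fold is independent of the simulation state
lemma foldl_stratStep_snd (n : Int) (l : List Int) :
    ∀ (sim : PySim) (ts : List (Int × Int × Int × Int)),
      (l.foldl (stratStep n) (sim, ts)).2 = ts ++ l.flatMap (rowTiles n) := by
  induction l with
  | nil => intro sim ts; simp
  | cons i l ih =>
    intro sim ts
    simp only [List.foldl_cons, List.flatMap_cons]
    rw [show stratStep n (sim, ts) i = ((stratStep n (sim, ts) i).1, (stratStep n (sim, ts) i).2) from rfl]
    rw [ih, stratStep_snd]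
    simp

lemma tiles_eq (n : Int) (h : 2 ≤ n) :
    (PySem.List.pyRange 0 n 1).flatMap (rowTiles n) =
      (0, 1, 1, n - 1) ::
        ((PySem.List.pyRange 1 (n - 1) 1).flatMap
          (fun i => [(i, 0, 1, i), (i, i + 1, 1, n - i - 1)]) ++ [(n - 1, 0, 1, n - 1)]) := by
  rw [PySem.List.pyRange_one_append 0 1 n (by omega) (by omega),
      PySem.List.pyRange_one_append 1 (n - 1) n (by omega) (by omega),
      show PySem.List.pyRange 0 1 1 = [0] from rfl]
  have h1 : PySem.List.pyRange (n - 1) n 1 = [n - 1] := by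
    have := PySem.List.pyRange_one_singleton (n - 1)
    simpa [show n - 1 + 1 = n by omega] using this
  rw [h1]
  simp only [List.flatMap_append, List.flatMap_cons, List.flatMap_nil]
  have h0 : rowTiles n 0 = [(0, 1, 1, n - 1)] := by
    simp [rowTiles]; omega
  have hl : rowTiles n (n - 1) = [(n - 1, 0, 1, n - 1)] := by
    simp [rowTiles]; omega
  have hm : (PySem.List.pyRange 1 (n - 1) 1).flatMap (rowTiles n) =
      (PySem.List.pyRange 1 (n - 1) 1).flatMap
        (fun i => [(i, 0, 1, i), (i, i + 1, 1, n - i - 1)]) := by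
    apply List.flatMap_congr
    intro i hi
    rw [PySem.List.mem_pyRange_one] at hi
    unfold rowTiles
    rw [if_pos (show i > 0 by omega), if_pos (show i < n - 1 by omega)]
    rfl
  rw [h0, hl, hm]
  simp

-- a flatMap emitting two elements per index has length 2·len (used for both ports)
lemma flatMap_pair_length {α : Type} (a b : Int → α) (l : List Int) :
    (l.flatMap (fun i => [a i, b i])).length = 2 * l.length := by
  induction l with
  | nil => rfl
  | cons x l ih => simp [List.flatMap_cons, ih]; omega

-- two small set-shape facts B's fill loop needs
lemma set_ends {α : Type} (k : Nat) (d a0 aL : α) :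
    ((List.replicate (k + 2) d).set 0 a0).set (k + 1) aL
      = a0 :: (List.replicate k d ++ [aL]) := by
  rw [List.replicate_succ, List.set_cons_zero, List.set_cons_succ, List.replicate_succ']
  have h1 : (List.replicate k d ++ [d]).set k aL = List.replicate k d ++ [aL] := by
    rw [List.set_append_right k aL (show (List.replicate k d).length ≤ k by simp)]
    simp
  rw [h1]

lemma set_pair {α : Type} (L R : List α) (d u v : α) :
    ((L ++ (d :: d :: R)).set L.length u).set (L.length + 1) v = L ++ (u :: v :: R) := by
  have h1 : (L ++ (d :: d :: R)).set L.length u = L ++ (u :: d :: R) := by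
    rw [List.set_append_right L.length u (Nat.le_refl _)]
    simp
  rw [h1]
  have h2 : (L ++ (u :: d :: R)).set (L.length + 1) v = L ++ (u :: v :: R) := by
    rw [List.set_append_right (L.length + 1) v (by omega)]
    rw [show L.length + 1 - L.length = 1 by omega]
    simp
  rw [h2]

-- invariant of B's fill loop: after processing range(1, 1+t) the list is
-- slot0, the 2t filled pair slots, the untouched Nones, and the last slot
lemma fill_inv (n : Int) (h2 : 2 ≤ n) (t : Nat) (ht : (t : Int) ≤ n - 2) :
    (PySem.List.pyRange 1 (1 + (t : Int)) 1).foldl (fillStep n)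
      (PySem.List.pySetD
        (PySem.List.pySetD (List.replicate (2 * n - 2).toNat none) 0 (some (0, 1, 1, n - 1)))
        (2 * n - 2 - 1) (some (n - 1, 0, 1, n - 1)))
    = some (0, 1, 1, n - 1) ::
        ((PySem.List.pyRange 1 (1 + (t : Int)) 1).flatMap
            (fun i => [some (i, 0, 1, i), some (i, i + 1, 1, n - i - 1)])
          ++ (List.replicate ((2 * n - 2).toNat - 2 - 2 * t) none
          ++ [some (n - 1, 0, 1, n - 1)])) := by
  induction t with
  | zero =>
    rw [PySem.List.pyRange_one_eq_nil (by omega)]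
    obtain ⟨k, hk⟩ : ∃ k : Nat, (2 * n - 2).toNat = k + 2 := ⟨(2 * n - 2).toNat - 2, by omega⟩
    rw [List.foldl_nil, List.flatMap_nil, List.nil_append, hk]
    rw [PySem.List.pySetD_of_nonneg _ _ (by omega), PySem.List.pySetD_of_nonneg _ _ (by omega)]
    rw [show (0 : Int).toNat = 0 from rfl, show (2 * n - 2 - 1).toNat = k + 1 by omega]
    rw [show k + 2 - 2 - 2 * 0 = k by omega]
    exact set_ends k none _ _
  | succ t ih =>
    have ht' : (t : Int) ≤ n - 2 := by push_cast at ht ⊢; omega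
    have hrange : PySem.List.pyRange 1 (1 + ((t + 1 : Nat) : Int)) 1
        = PySem.List.pyRange 1 (1 + (t : Int)) 1 ++ [1 + (t : Int)] := by
      have h := PySem.List.pyRange_one_succ_right (a := 1) (b := 1 + (t : Int)) (by omega)
      rw [show (1 : Int) + ((t + 1 : Nat) : Int) = 1 + (t : Int) + 1 by push_cast; ring]
      exact h
    rw [hrange, List.foldl_append, ih ht', List.foldl_cons, List.foldl_nil]
    obtain ⟨c, hc⟩ : ∃ c : Nat, (2 * n - 2).toNat - 2 - 2 * t = c + 2 :=
      ⟨(2 * n - 2).toNat - 2 - 2 * t - 2, by push_cast at ht; omega⟩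
    have hflatlen : ((PySem.List.pyRange 1 (1 + (t : Int)) 1).flatMap
        (fun i => ([some (i, 0, 1, i), some (i, i + 1, 1, n - i - 1)] :
          List (Option (Int × Int × Int × Int))))).length = 2 * t := by
      rw [flatMap_pair_length, PySem.List.length_pyRange_one]
      omega
    rw [List.flatMap_append]
    simp only [List.flatMap_cons, List.flatMap_nil, List.append_nil]
    rw [hc, show (2 * n - 2).toNat - 2 - 2 * (t + 1) = c by omega]
    unfold fillStep
    rw [PySem.List.pySetD_of_nonneg _ _ (by omega), PySem.List.pySetD_of_nonneg _ _ (by omega)]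
    rw [show (2 * (1 + (t : Int)) - 1).toNat = 2 * t + 1 by omega,
        show (2 * (1 + (t : Int))).toNat = (2 * t + 1) + 1 by omega]
    rw [List.set_cons_succ, List.set_cons_succ]
    congr 1
    have hrep : (List.replicate (c + 2) (none : Option (Int × Int × Int × Int)))
        ++ [some (n - 1, 0, 1, n - 1)]
        = none :: none :: (List.replicate c none ++ [some (n - 1, 0, 1, n - 1)]) := by
      simp [List.replicate_succ]
    rw [← hflatlen, hrep]
    have hsp := set_pair
      (List.flatMap (fun i => ([some (i, 0, 1, i), some (i, i + 1, 1, n - i - 1)] :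
          List (Option (Int × Int × Int × Int))))
        (PySem.List.pyRange 1 (1 + (t : Int)) 1))
      (List.replicate c none ++ [some (n - 1, 0, 1, n - 1)])
      none (some (1 + (t : Int), 0, 1, 1 + (t : Int)))
      (some (1 + (t : Int), 1 + (t : Int) + 1, 1, n - (1 + (t : Int)) - 1))
    refine hsp.trans ?_
    rw [List.append_assoc]
    rfl

-- B's value for n ≥ 2, in the same shape as tiles_eq's right-hand side
lemma alt_eq (n : Int) (h2 : 2 ≤ n) :
    strategy_diagonal_alt n =
      (2 * n - 2,
        (0, 1, 1, n - 1) ::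
          ((PySem.List.pyRange 1 (n - 1) 1).flatMap
            (fun i => [(i, 0, 1, i), (i, i + 1, 1, n - i - 1)]) ++ [(n - 1, 0, 1, n - 1)])) := by
  simp only [strategy_diagonal_alt, if_neg (by omega : ¬ n ≤ 1)]
  have hend : (1 : Int) + (((n - 2).toNat : Nat) : Int) = n - 1 := by omega
  have := fill_inv n h2 (n - 2).toNat (by omega)
  rw [hend] at this
  rw [this, show (2 * n - 2).toNat - 2 - 2 * (n - 2).toNat = 0 by omega]
  simp only [List.replicate_zero, List.nil_append, Prod.mk.injEq, true_and]
  rw [List.map_cons, List.map_append, List.map_flatMap]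
  simp

-- ===== VERDICT (by name: the statement is the Claim_ definition above) =====
theorem strategy_diagonal_spec : Claim_equal_strategy_diagonal := by
  intro n _
  unfold Spec_strategy_diagonal
  simp only [strategy_diagonal]
  rw [foldl_stratStep_snd]
  by_cases h : n ≤ 1
  · have he : (PySem.List.pyRange 0 n 1).flatMap (rowTiles n) = [] := by
      by_cases h0 : n ≤ 0
      · rw [PySem.List.pyRange_one_eq_nil (by omega)]; rfl
      · have hn1 : n = 1 := by omega
        subst hn1
        decide
    rw [he]
    simp [strategy_diagonal_alt, h]
  · have h2 : 2 ≤ n := by omega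
    rw [tiles_eq n h2, alt_eq n h2]
    simp only [List.nil_append, Prod.mk.injEq]
    refine ⟨?_, trivial⟩
    simp only [List.length_cons, List.length_append, List.length_nil,
      flatMap_pair_length, PySem.List.length_pyRange_one]
    push_cast
    omega
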